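-- pv_equiv track=rewrite | github.com/maueval/AOJ | vol00/0017_Caesar_Cipher.py | get_candidate_plain
-- ===== SOURCE A (Python) =====
-- def code_shift(c, n_shift):
--     return ord('a') + (ord(c) + n_shift - ord('a')) % 26
--
-- def get_candidate_plain(cipher, sym_ids, n_shift):
--     plain = []
--     for i, c in enumerate(cipher):
--         if i not in sym_ids:
--             plain.append(chr(code_shift(c, n_shift)))
--         else:
--             plain.append(c)
--     plain = ''.join(plain)
--     return plain
-- ===== SOURCE B (Python) =====
-- def code_shift(c, n_shift):
--     return ord('a') + (ord(c) + n_shift - ord('a')) % 26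
--
-- def get_candidate_plain(cipher, sym_ids, n_shift):
--     cs = list(cipher)
--     plain = [chr(code_shift(c, n_shift)) for c in cs]
--     n = len(cs)
--     for i in sym_ids:
--         if 0 <= i < n:
--             plain[i] = cs[i]
--     return ''.join(plain)
-- ===== Notes on version B (the rewrite author's own statement) =====
-- stated objective: alternative
-- what changed: Instead of testing 'i in sym_ids' for every character inside one conditional pass, B shifts every character in one unconditional pass and then walks sym_ids once, restoring the original character at each valid index.
import Mathlib
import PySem

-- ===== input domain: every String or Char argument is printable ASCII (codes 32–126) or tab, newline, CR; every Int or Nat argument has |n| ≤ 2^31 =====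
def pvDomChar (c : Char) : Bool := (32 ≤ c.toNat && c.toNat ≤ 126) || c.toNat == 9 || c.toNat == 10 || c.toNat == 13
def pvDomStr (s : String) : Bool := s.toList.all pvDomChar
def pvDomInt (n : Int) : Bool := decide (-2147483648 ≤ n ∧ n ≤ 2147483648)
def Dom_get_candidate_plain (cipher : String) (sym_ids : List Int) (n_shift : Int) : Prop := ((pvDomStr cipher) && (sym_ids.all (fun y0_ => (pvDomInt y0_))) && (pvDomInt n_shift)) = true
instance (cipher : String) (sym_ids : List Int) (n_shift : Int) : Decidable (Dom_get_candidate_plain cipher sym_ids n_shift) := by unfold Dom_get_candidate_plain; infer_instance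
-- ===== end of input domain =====

-- B replaces A's per-character membership-test pass by an unconditional shift-all pass plus a
-- second pass over sym_ids that restores the original character at each valid index (alternative decomposition).

-- ===== PORT A =====
-- code_shift(c, n_shift) = ord('a') + (ord(c) + n_shift - ord('a')) % 26   (Python %, divisor 26 > 0)
def codeShift (c : Char) (n_shift : Int) : Int :=
  97 + PySem.Int.mod ((c.toNat : Int) + n_shift - 97) 26

def get_candidate_plain (cipher : String) (sym_ids : List Int) (n_shift : Int) : String :=
  -- plain = []; for i, c in enumerate(cipher): append shifted if i not in sym_ids else c; ''.join
  String.mk ((PySem.List.enumerate cipher.toList 0).foldl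
    (fun (acc : List Char) (p : Int × Char) =>
      acc ++ [if p.1 ∉ sym_ids then Char.ofNat (codeShift p.2 n_shift).toNat else p.2]) [])

-- ===== PORT B =====
def get_candidate_plain_alt (cipher : String) (sym_ids : List Int) (n_shift : Int) : String :=
  let cs := cipher.toList
  let plain := cs.map (fun c => Char.ofNat (codeShift c n_shift).toNat)
  let plain := sym_ids.foldl
    (fun (acc : List Char) (i : Int) =>
      if 0 ≤ i ∧ i < (cs.length : Int) then acc.set i.toNat (cs.getD i.toNat ' ') else acc) plain
  String.mk plain

-- ===== PRECONDITION & SPEC =====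
def Spec_get_candidate_plain (cipher : String) (sym_ids : List Int) (n_shift : Int) (out : String) : Prop := out = get_candidate_plain_alt cipher sym_ids n_shift
instance (cipher : String) (sym_ids : List Int) (n_shift : Int) (out : String) : Decidable (Spec_get_candidate_plain cipher sym_ids n_shift out) := by unfold Spec_get_candidate_plain; infer_instance

-- ===== CLAIM (what is proved, stated in full; the proofs are below) =====
def Claim_equal_get_candidate_plain : Prop := ∀ (cipher : String) (sym_ids : List Int) (n_shift : Int), Dom_get_candidate_plain cipher sym_ids n_shift → Spec_get_candidate_plain cipher sym_ids n_shift (get_candidate_plain cipher sym_ids n_shift)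

-- ===== LEMMAS AND PROOFS =====

-- The restoration fold, characterised pointwise by getElem?.
theorem restore_getElem? (cs : List Char) (l : List Int) (acc : List Char)
    (hlen : acc.length = cs.length) (j : Nat) :
    (l.foldl (fun (acc : List Char) (i : Int) =>
        if 0 ≤ i ∧ i < (cs.length : Int) then acc.set i.toNat (cs.getD i.toNat ' ') else acc) acc)[j]?
      = if (j : Int) ∈ l then cs[j]? else acc[j]? := by
  induction l generalizing acc with
  | nil => simp
  | cons i l ih =>
    simp only [List.foldl_cons]
    by_cases hin : (0 ≤ i ∧ i < (cs.length : Int))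
    · rw [if_pos hin, ih _ (by simp [hlen])]
      by_cases hl : (j : Int) ∈ l
      · simp [hl]
      · simp only [List.mem_cons, hl, or_false]
        by_cases hji : (j : Int) = i
        · have hj : j = i.toNat := by omega
          have hjlt : j < cs.length := by omega
          rw [if_pos hji]
          rw [List.getElem?_set, if_pos hj.symm, if_pos (by omega : i.toNat < acc.length)]
          rw [List.getElem?_eq_getElem hjlt, List.getD_eq_getElem _ _ (by omega : i.toNat < cs.length)]
          simp [hj]
        · rw [if_neg hji, List.getElem?_set, if_neg (by omega : ¬ i.toNat = j)]
          simp
    · rw [if_neg hin, ih _ hlen]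
      by_cases hl : (j : Int) ∈ l
      · simp [hl]
      · simp only [List.mem_cons, hl, or_false]
        by_cases hji : (j : Int) = i
        · -- i = j ≥ 0 but not in range, so j ≥ cs.length: both sides none
          have hj : cs.length ≤ j := by omega
          rw [if_pos hji, List.getElem?_eq_none (by omega), List.getElem?_eq_none (by omega)]
          simp
        · rw [if_neg hji]
          simp

theorem get_candidate_plain_lists (cipher : String) (sym_ids : List Int) (n_shift : Int) :
    get_candidate_plain cipher sym_ids n_shift = get_candidate_plain_alt cipher sym_ids n_shift := by
  unfold get_candidate_plain get_candidate_plain_alt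
  congr 1
  apply List.ext_getElem?
  intro j
  rw [restore_getElem? _ _ _ (by simp) j]
  rw [PySem.List.foldl_append_singleton_eq_map, List.nil_append]
  rw [List.getElem?_map, PySem.List.getElem?_enumerate]
  by_cases hm : (j : Int) ∈ sym_ids
  · cases h : cipher.toList[j]? with
    | none => simp [h]
    | some c => simp [h, hm]
  · simp only [hm, if_neg]
    cases h : cipher.toList[j]? with
    | none => simp [h]
    | some c => simp [h, hm]

-- ===== VERDICT (by name: the statement is the Claim_ definition above) =====
theorem get_candidate_plain_spec : Claim_equal_get_candidate_plain := by
  intro cipher sym_ids n_shift _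
  exact get_candidate_plain_lists cipher sym_ids n_shift
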